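-- pv_equiv track=rewrite | github.com/Angela-OH/Algorithm | 기타/GDSC코테_5.py | solution
-- ===== SOURCE A (Python) =====
-- def binary_search_asc(arr, start, end, target):
--     while start < end:
--         mid = (start + end) // 2
--         if arr[mid] < target:
--             start = mid + 1
--         else:
--             end = mid
--     return end
--
-- def binary_search_desc(arr, start, end, target):
--     while start < end:
--         mid = (start + end) // 2
--         if arr[mid] >= target:
--             start = mid + 1
--         else:
--             end = mid
--     return end
--
-- def solution(kyul):
--     # 최장증가수열 + 이진탐색으로 풀기 (효율성..)
--     answer = 0
--     asc, desc = [], []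
--     asc.append(kyul[0])
--     desc.append(kyul[0])
--
--     # 오름차순 확인
--     index = 1
--     while index < len(kyul):
--         if asc[-1] < kyul[index]:
--             asc.append(kyul[index])
--         else:
--             asc[binary_search_asc(asc, 0, len(asc) - 1, kyul[index])] = kyul[index]
--         index += 1
--
--     # 내림차순 확인
--     index = 1
--     while index < len(kyul):
--         if desc[-1] > kyul[index]:
--             desc.append(kyul[index])
--         else:
--             desc[binary_search_desc(desc, 0, len(desc) - 1, kyul[index])] = kyul[index]
--         index += 1
--
--     if len(asc) > len(desc):
--         answer = len(kyul) - len(asc)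
--     else:
--         answer = len(kyul) - len(desc)
--
--     return answer
-- ===== SOURCE B (Python) =====
-- def solution(kyul):
--     # One fused pass over two patience piles; each element's slot is found by counting.
--     inc, dec = [], []
--     for x in kyul:
--         if not inc or inc[-1] < x:
--             inc.append(x)
--         else:
--             inc[sum(1 for v in inc if v < x)] = x
--         if not dec or dec[-1] > x:
--             dec.append(x)
--         elif dec[-1] < x:
--             dec[sum(1 for v in dec if v >= x)] = x
--         # dec[-1] == x: every slot already holds a value >= x, nothing to update
--     return len(kyul) - max(len(inc), len(dec))
-- ===== Notes on version B (the rewrite author's own statement) =====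
-- stated objective: simpler
-- what changed: B drops both hand-written binary searches and the two separate passes: one fused pass maintains both piles, each element's replacement slot is found by counting pile entries below/at-least it (an element equal to the descending pile's floor is a no-op and is skipped), and the answer is len(kyul) - max(pile lengths); Pre_ excludes only the empty list, on which A raises IndexError.
import Mathlib
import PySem

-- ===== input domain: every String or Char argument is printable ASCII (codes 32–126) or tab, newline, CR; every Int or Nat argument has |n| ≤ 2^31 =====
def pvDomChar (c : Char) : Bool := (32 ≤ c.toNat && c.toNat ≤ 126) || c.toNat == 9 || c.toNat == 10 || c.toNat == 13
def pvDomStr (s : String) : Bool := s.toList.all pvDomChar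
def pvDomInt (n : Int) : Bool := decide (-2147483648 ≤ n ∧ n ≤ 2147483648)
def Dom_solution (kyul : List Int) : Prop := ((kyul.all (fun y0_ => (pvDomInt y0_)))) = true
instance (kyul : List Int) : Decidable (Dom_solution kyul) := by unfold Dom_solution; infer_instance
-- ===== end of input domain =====

-- B replaces A's two hand-written binary searches and two passes by ONE fused pass in which each
-- element's pile slot is found by counting (equal-to-floor elements are skipped, a no-op slot);
-- objective: simpler.


-- ===== PORT A =====
-- while start < end: mid = (start+end)//2; if arr[mid] < target: start = mid+1 else: end = mid
-- (arr[mid] ported with pyGetD: every call solution makes has 0 ≤ mid < len(arr), where it is exact)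
def bsAsc (arr : List Int) (s e t : Int) : Int :=
  if h : s < e then
    if PySem.List.pyGetD arr (PySem.Int.floordiv (s + e) 2) 0 < t then
      bsAsc arr (PySem.Int.floordiv (s + e) 2 + 1) e t
    else
      bsAsc arr s (PySem.Int.floordiv (s + e) 2) t
  else e
termination_by (e - s).toNat
decreasing_by
  · have h1 : s ≤ PySem.Int.floordiv (s + e) 2 :=
      (PySem.Int.le_floordiv_iff_mul_le (by omega)).mpr (by omega)
    omega
  · have h2 : PySem.Int.floordiv (s + e) 2 < e :=
      (PySem.Int.floordiv_lt_iff_lt_mul (by omega)).mpr (by omega)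
    have h1 : s ≤ PySem.Int.floordiv (s + e) 2 :=
      (PySem.Int.le_floordiv_iff_mul_le (by omega)).mpr (by omega)
    omega

-- while start < end: mid = (start+end)//2; if arr[mid] >= target: start = mid+1 else: end = mid
def bsDesc (arr : List Int) (s e t : Int) : Int :=
  if h : s < e then
    if t ≤ PySem.List.pyGetD arr (PySem.Int.floordiv (s + e) 2) 0 then
      bsDesc arr (PySem.Int.floordiv (s + e) 2 + 1) e t
    else
      bsDesc arr s (PySem.Int.floordiv (s + e) 2) t
  else e
termination_by (e - s).toNat
decreasing_by
  · have h1 : s ≤ PySem.Int.floordiv (s + e) 2 :=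
      (PySem.Int.le_floordiv_iff_mul_le (by omega)).mpr (by omega)
    omega
  · have h2 : PySem.Int.floordiv (s + e) 2 < e :=
      (PySem.Int.floordiv_lt_iff_lt_mul (by omega)).mpr (by omega)
    have h1 : s ≤ PySem.Int.floordiv (s + e) 2 :=
      (PySem.Int.le_floordiv_iff_mul_le (by omega)).mpr (by omega)
    omega

-- body of A's first while loop: if asc[-1] < kyul[index]: append else asc[bs...] = kyul[index]
def ascStep (asc : List Int) (x : Int) : List Int :=
  if PySem.List.pyGetD asc (-1) 0 < x then asc ++ [x]
  else PySem.List.pySetD asc (bsAsc asc 0 (PySem.List.len asc - 1) x) x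

-- body of A's second while loop
def descStep (desc : List Int) (x : Int) : List Int :=
  if PySem.List.pyGetD desc (-1) 0 > x then desc ++ [x]
  else PySem.List.pySetD desc (bsDesc desc 0 (PySem.List.len desc - 1) x) x

def solution (kyul : List Int) : Int :=
  match kyul with
  | [] => 0      -- Python raises IndexError reading the first element; excluded by Pre_solution
  | k :: rest =>
    let asc := rest.foldl ascStep [k]
    let desc := rest.foldl descStep [k]
    if PySem.List.len asc > PySem.List.len desc then PySem.List.len kyul - PySem.List.len asc
    else PySem.List.len kyul - PySem.List.len desc

-- ===== PORT B =====
-- if not inc or inc[-1] < x: inc.append(x) else: inc[sum(1 for v in inc if v < x)] = x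
def incStep (inc : List Int) (x : Int) : List Int :=
  if inc = [] ∨ PySem.List.pyGetD inc (-1) 0 < x then inc ++ [x]
  else inc.set (inc.countP (fun v => decide (v < x))) x

-- if not dec or dec[-1] > x: dec.append(x)
-- elif dec[-1] < x: dec[sum(1 for v in dec if v >= x)] = x
-- (dec[-1] == x: nothing to update)
def decStep (dec : List Int) (x : Int) : List Int :=
  if dec = [] ∨ PySem.List.pyGetD dec (-1) 0 > x then dec ++ [x]
  else if PySem.List.pyGetD dec (-1) 0 < x then
    dec.set (dec.countP (fun v => decide (x ≤ v))) x
  else dec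

def solution_alt (kyul : List Int) : Int :=
  let p := kyul.foldl (fun (p : List Int × List Int) x => (incStep p.1 x, decStep p.2 x)) ([], [])
  PySem.List.len kyul - ((max p.1.length p.2.length : Nat) : Int)

-- ===== PRECONDITION & SPEC =====
-- A unconditionally reads the first element, so it raises IndexError on the empty list; that is the only
-- exclusion.
def Pre_solution (kyul : List Int) : Prop := kyul ≠ []
instance (kyul : List Int) : Decidable (Pre_solution kyul) := by unfold Pre_solution; infer_instance
def pvWitness_solution : List Int := [1, 3, 2]

def Spec_solution (kyul : List Int) (out : Int) : Prop := out = solution_alt kyul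
instance (kyul : List Int) (out : Int) : Decidable (Spec_solution kyul out) := by unfold Spec_solution; infer_instance

-- ===== CLAIM (what is proved, stated in full; the proofs are below) =====
def Claim_equal_solution : Prop := ∀ (kyul : List Int), Dom_solution kyul → Pre_solution kyul → Spec_solution kyul (solution kyul)

-- ===== LEMMAS AND PROOFS =====

-- In a list where the (decidable) property p can only get lost left-to-right, p holds
-- exactly on the first (countP p) positions.
theorem prefix_countP {α : Type} (p : α → Bool) :
    ∀ (l : List α), l.Pairwise (fun a b => p b = true → p a = true) →
      ∀ i (hi : i < l.length), (p l[i] = true ↔ i < l.countP p) := by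
  intro l hl
  induction l with
  | nil => intro i hi; simp at hi
  | cons a l ih =>
    have ha : ∀ b ∈ l, p b = true → p a = true := (List.pairwise_cons.mp hl).1
    have hl' := (List.pairwise_cons.mp hl).2
    intro i hi
    cases i with
    | zero =>
      simp only [List.getElem_cons_zero, List.countP_cons]
      constructor
      · intro h; simp [h]
      · intro h
        by_contra hpa
        simp [hpa] at h
        obtain ⟨b, hb, hpb⟩ := h
        exact absurd (ha b hb hpb) (by simp [hpa])
    | succ i =>
      simp only [List.getElem_cons_succ, List.countP_cons]
      have hi' : i < l.length := by simpa using hi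
      have hiff := ih hl' i hi'
      rcases Bool.eq_false_or_eq_true (p a) with hpa | hpa
      · simpa [hpa, Nat.succ_lt_succ_iff] using hiff
      · have hfalse : ¬ p l[i] = true :=
          fun h => absurd (ha _ (List.getElem_mem hi') h) (by simp [hpa])
        have h2 : ¬ i < l.countP p := fun hh => hfalse (hiff.mpr hh)
        simp [hpa, hfalse]
        omega

-- bsAsc on an array whose "< t" entries are exactly the first c positions returns min c e.
theorem bsAsc_eq (arr : List Int) (t c : Int)
    (H : ∀ i (hi : i < arr.length), (arr[i] < t ↔ (i : Int) < c))
    (s e : Int) (hs : 0 ≤ s) (hse : s ≤ e) (he : e ≤ (arr.length : Int)) (hsc : s ≤ c) :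
    bsAsc arr s e t = min c e := by
  rw [bsAsc]
  split
  · rename_i h
    have hm1 : s ≤ PySem.Int.floordiv (s + e) 2 :=
      (PySem.Int.le_floordiv_iff_mul_le (by omega)).mpr (by omega)
    have hm2 : PySem.Int.floordiv (s + e) 2 < e :=
      (PySem.Int.floordiv_lt_iff_lt_mul (by omega)).mpr (by omega)
    set mid := PySem.Int.floordiv (s + e) 2 with hmid
    have hlt : mid < (arr.length : Int) := by omega
    have hnn : (0:Int) ≤ mid := by omega
    have hmn : mid.toNat < arr.length := by omega
    have hget : PySem.List.pyGetD arr mid 0 = arr[mid.toNat] :=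
      PySem.List.pyGetD_eq_getElem (xs := arr) (i := mid) (d := 0) hnn hlt
    have hiff := H mid.toNat hmn
    have hcast : ((mid.toNat : Int)) = mid := by omega
    rw [hcast] at hiff
    split
    · rename_i hcond
      rw [hget] at hcond
      have : mid < c := hiff.mp hcond
      exact bsAsc_eq arr t c H (mid + 1) e (by omega) (by omega) he (by omega)
    · rename_i hcond
      rw [hget] at hcond
      have hcm : c ≤ mid := by
        by_contra hx
        exact hcond (hiff.mpr (by omega))
      have := bsAsc_eq arr t c H s mid hs (by omega) (by omega) hsc
      rw [this]
      omega
  · omega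
termination_by (e - s).toNat
decreasing_by
  · omega
  · omega

theorem bsDesc_eq (arr : List Int) (t c : Int)
    (H : ∀ i (hi : i < arr.length), (t ≤ arr[i] ↔ (i : Int) < c))
    (s e : Int) (hs : 0 ≤ s) (hse : s ≤ e) (he : e ≤ (arr.length : Int)) (hsc : s ≤ c) :
    bsDesc arr s e t = min c e := by
  rw [bsDesc]
  split
  · rename_i h
    have hm1 : s ≤ PySem.Int.floordiv (s + e) 2 :=
      (PySem.Int.le_floordiv_iff_mul_le (by omega)).mpr (by omega)
    have hm2 : PySem.Int.floordiv (s + e) 2 < e :=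
      (PySem.Int.floordiv_lt_iff_lt_mul (by omega)).mpr (by omega)
    set mid := PySem.Int.floordiv (s + e) 2 with hmid
    have hlt : mid < (arr.length : Int) := by omega
    have hnn : (0:Int) ≤ mid := by omega
    have hmn : mid.toNat < arr.length := by omega
    have hget : PySem.List.pyGetD arr mid 0 = arr[mid.toNat] :=
      PySem.List.pyGetD_eq_getElem (xs := arr) (i := mid) (d := 0) hnn hlt
    have hiff := H mid.toNat hmn
    have hcast : ((mid.toNat : Int)) = mid := by omega
    rw [hcast] at hiff
    split
    · rename_i hcond
      rw [hget] at hcond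
      have : mid < c := hiff.mp hcond
      exact bsDesc_eq arr t c H (mid + 1) e (by omega) (by omega) he (by omega)
    · rename_i hcond
      rw [hget] at hcond
      have hcm : c ≤ mid := by
        by_contra hx
        exact hcond (hiff.mpr (by omega))
      have := bsDesc_eq arr t c H s mid hs (by omega) (by omega) hsc
      rw [this]
      omega
  · omega
termination_by (e - s).toNat
decreasing_by
  · omega
  · omega

def AscInv (l : List Int) : Prop := l ≠ [] ∧ l.Pairwise (· < ·)
def DescInv (l : List Int) : Prop := l ≠ [] ∧ l.Pairwise (fun a b => b ≤ a)

theorem mem_le_getLast {l : List Int} (hs : l.Pairwise (· ≤ ·)) (hne : l ≠ []) :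
    ∀ a ∈ l, a ≤ l.getLast hne := by
  intro a ha
  obtain ⟨i, hi, rfl⟩ := List.getElem_of_mem ha
  rw [List.getLast_eq_getElem]
  rcases Nat.lt_or_ge i (l.length - 1) with h | h
  · exact List.pairwise_iff_getElem.mp hs i (l.length - 1) hi (by omega) h
  · have : i = l.length - 1 := by omega
    subst this; exact le_refl _

theorem mem_ge_getLast {l : List Int} (hs : l.Pairwise (fun a b => b ≤ a)) (hne : l ≠ []) :
    ∀ a ∈ l, l.getLast hne ≤ a := by
  intro a ha
  obtain ⟨i, hi, rfl⟩ := List.getElem_of_mem ha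
  rw [List.getLast_eq_getElem]
  rcases Nat.lt_or_ge i (l.length - 1) with h | h
  · exact List.pairwise_iff_getElem.mp hs i (l.length - 1) hi (by omega) h
  · have : i = l.length - 1 := by omega
    subst this; exact le_refl _

theorem asc_step (l : List Int) (x : Int) (h : AscInv l) :
    ascStep l x = incStep l x ∧ AscInv (ascStep l x) := by
  obtain ⟨hne, hsort⟩ := h
  have hlen : 0 < l.length := by
    cases l with
    | nil => exact absurd rfl hne
    | cons a t => simp
  have hlast : PySem.List.pyGetD l (-1) 0 = l.getLast hne := PySem.List.pyGetD_neg_one l 0 hne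
  by_cases hc : PySem.List.pyGetD l (-1) 0 < x
  · have heqA : ascStep l x = l ++ [x] := by simp [ascStep, hc]
    have heqB : incStep l x = l ++ [x] := by simp [incStep, hc]
    refine ⟨heqA.trans heqB.symm, ?_, ?_⟩
    · rw [heqA]; simp
    · rw [heqA, List.pairwise_append]
      refine ⟨hsort, by simp, ?_⟩
      intro a ha b hb
      simp only [List.mem_singleton] at hb
      subst hb
      have h1 : a ≤ l.getLast hne :=
        mem_le_getLast (hsort.imp fun hab => le_of_lt hab) hne a ha
      rw [hlast] at hc
      omega
  · -- replacement branch: the binary search lands on the count of entries < x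
    have hpair' : l.Pairwise (fun a b => (decide (b < x) : Bool) = true → (decide (a < x) : Bool) = true) := by
      apply List.Pairwise.imp ?_ hsort
      intro a b hab hb
      simp only [decide_eq_true_eq] at hb ⊢
      omega
    have hpre := prefix_countP (fun v => decide (v < x)) l hpair'
    have hpre' : ∀ i (hi : i < l.length), (l[i] < x ↔ i < l.countP (fun v => decide (v < x))) := by
      intro i hi
      simpa using hpre i hi
    have hgl : l.getLast hne = l[l.length - 1] := List.getLast_eq_getElem hne
    have hxlast : ¬ l.getLast hne < x := by rw [← hlast]; exact hc
    have hcle : l.countP (fun v => decide (v < x)) ≤ l.length - 1 := by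
      by_contra hx
      have h2 : l[l.length - 1] < x := (hpre' (l.length - 1) (by omega)).mpr (by omega)
      rw [← hgl] at h2
      exact hxlast h2
    have hH : ∀ i (hi : i < l.length),
        (l[i] < x ↔ (i : Int) < ((l.countP (fun v => decide (v < x)) : Nat) : Int)) := by
      intro i hi
      rw [hpre' i hi]
      exact (Nat.cast_lt).symm
    have hbs := bsAsc_eq l x ((l.countP (fun v => decide (v < x)) : Nat) : Int) hH 0
      ((l.length : Int) - 1) (by omega) (by omega) (by omega) (by omega)
    have heqA : ascStep l x = l.set (l.countP (fun v => decide (v < x))) x := by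
      simp only [ascStep, if_neg hc, PySem.List.len_eq]
      rw [hbs]
      have hmin : min ((l.countP (fun v => decide (v < x)) : Nat) : Int) ((l.length : Int) - 1)
          = ((l.countP (fun v => decide (v < x)) : Nat) : Int) := by omega
      rw [hmin]
      simp only [PySem.List.pySetD_natCast]
    have heqB : incStep l x = l.set (l.countP (fun v => decide (v < x))) x := by
      simp only [incStep]
      rw [if_neg (by simp [hne, hc])]
    have hclt : l.countP (fun v => decide (v < x)) < l.length := by omega
    have hxc : ¬ l[l.countP (fun v => decide (v < x))]'hclt < x := by
      intro hx
      have := (hpre' _ hclt).mp hx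
      omega
    have hsl := List.pairwise_iff_getElem.mp hsort
    refine ⟨heqA.trans heqB.symm, ?_, ?_⟩
    · rw [heqA]
      intro hnil
      have h0 : l.length = 0 := by simpa using congrArg List.length hnil
      omega
    · rw [heqA, List.pairwise_iff_getElem]
      intro i j hi hj hij
      have hlenset : (l.set (l.countP (fun v => decide (v < x))) x).length = l.length := by simp
      rw [List.getElem_set, List.getElem_set]
      split_ifs with h1 h2 h3
      · omega
      · have h4 := hsl (l.countP (fun v => decide (v < x))) j (by omega) (by omega) (by omega)
        omega
      · exact (hpre' i (by omega)).mpr (by omega)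
      · exact hsl i j (by omega) (by omega) hij

theorem desc_step (l : List Int) (x : Int) (h : DescInv l) :
    descStep l x = decStep l x ∧ DescInv (descStep l x) := by
  obtain ⟨hne, hsort⟩ := h
  have hlen : 0 < l.length := by
    cases l with
    | nil => exact absurd rfl hne
    | cons a t => simp
  have hlast : PySem.List.pyGetD l (-1) 0 = l.getLast hne := PySem.List.pyGetD_neg_one l 0 hne
  have hgl : l.getLast hne = l[l.length - 1] := List.getLast_eq_getElem hne
  by_cases hc : PySem.List.pyGetD l (-1) 0 > x
  · have heqA : descStep l x = l ++ [x] := by simp [descStep, hc]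
    have heqB : decStep l x = l ++ [x] := by simp [decStep, hc]
    refine ⟨heqA.trans heqB.symm, ?_, ?_⟩
    · rw [heqA]; simp
    · rw [heqA, List.pairwise_append]
      refine ⟨hsort, by simp, ?_⟩
      intro a ha b hb
      simp only [List.mem_singleton] at hb
      subst hb
      have h1 : l.getLast hne ≤ a := mem_ge_getLast hsort hne a ha
      rw [hlast] at hc
      omega
  · by_cases hlt : PySem.List.pyGetD l (-1) 0 < x
    · -- last < x: the binary search lands on the count of entries ≥ x, which is < len
      have hpair' : l.Pairwise (fun a b => (decide (x ≤ b) : Bool) = true → (decide (x ≤ a) : Bool) = true) := by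
        apply List.Pairwise.imp ?_ hsort
        intro a b hab hb
        simp only [decide_eq_true_eq] at hb ⊢
        omega
      have hpre := prefix_countP (fun v => decide (x ≤ v)) l hpair'
      have hpre' : ∀ i (hi : i < l.length), (x ≤ l[i] ↔ i < l.countP (fun v => decide (x ≤ v))) := by
        intro i hi
        simpa using hpre i hi
      have hxlast : ¬ x ≤ l.getLast hne := by rw [← hlast]; omega
      have hcle : l.countP (fun v => decide (x ≤ v)) ≤ l.length - 1 := by
        by_contra hx
        have h2 : x ≤ l[l.length - 1] := (hpre' (l.length - 1) (by omega)).mpr (by omega)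
        rw [← hgl] at h2
        exact hxlast h2
      have hH : ∀ i (hi : i < l.length),
          (x ≤ l[i] ↔ (i : Int) < ((l.countP (fun v => decide (x ≤ v)) : Nat) : Int)) := by
        intro i hi
        rw [hpre' i hi]
        exact (Nat.cast_lt).symm
      have hbs := bsDesc_eq l x ((l.countP (fun v => decide (x ≤ v)) : Nat) : Int) hH 0
        ((l.length : Int) - 1) (by omega) (by omega) (by omega) (by omega)
      have heqA : descStep l x = l.set (l.countP (fun v => decide (x ≤ v))) x := by
        simp only [descStep, if_neg hc, PySem.List.len_eq]
        rw [hbs]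
        have hmin : min ((l.countP (fun v => decide (x ≤ v)) : Nat) : Int) ((l.length : Int) - 1)
            = ((l.countP (fun v => decide (x ≤ v)) : Nat) : Int) := by omega
        rw [hmin]
        simp only [PySem.List.pySetD_natCast]
      have heqB : decStep l x = l.set (l.countP (fun v => decide (x ≤ v))) x := by
        simp only [decStep]
        rw [if_neg (by simp [hne, hc]), if_pos hlt]
      have hclt : l.countP (fun v => decide (x ≤ v)) < l.length := by omega
      have hsl := List.pairwise_iff_getElem.mp hsort
      refine ⟨heqA.trans heqB.symm, ?_, ?_⟩
      · rw [heqA]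
        intro hnil
        have h0 : l.length = 0 := by simpa using congrArg List.length hnil
        omega
      · rw [heqA, List.pairwise_iff_getElem]
        intro i j hi hj hij
        have hlenset : (l.set (l.countP (fun v => decide (x ≤ v))) x).length = l.length := by simp
        rw [List.getElem_set, List.getElem_set]
        split_ifs with h1 h2 h3
        · omega
        · -- j is the slot: x ≤ l[i] since i < slot = count of entries ≥ x
          exact (hpre' i (by omega)).mpr (by omega)
        · -- i is the slot: show l[j] ≤ x
          have hcx : ¬ x ≤ l[l.countP (fun v => decide (x ≤ v))]'(by omega) := by
            intro hx
            have := (hpre' _ (by omega)).mp hx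
            omega
          have h4 := hsl (l.countP (fun v => decide (x ≤ v))) j (by omega) (by omega) (by omega)
          omega
        · exact hsl i j (by omega) (by omega) hij
    · -- last == x: A's search clamps to the last slot and overwrites it with its own value (no-op);
      -- B does nothing.
      have heqx : l.getLast hne = x := by rw [← hlast]; omega
      have hH : ∀ i (hi : i < l.length), (x ≤ l[i] ↔ (i : Int) < ((l.length : Nat) : Int)) := by
        intro i hi
        constructor
        · intro _; exact_mod_cast hi
        · intro _
          have := mem_ge_getLast hsort hne l[i] (List.getElem_mem hi)
          omega
      have hbs := bsDesc_eq l x ((l.length : Nat) : Int) hH 0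
        ((l.length : Int) - 1) (by omega) (by omega) (by omega) (by omega)
      have hsetid : l.set (l.length - 1) x = l := by
        apply List.ext_getElem (by simp)
        intro i hi1 hi2
        rw [List.getElem_set]
        split_ifs with h1
        · subst h1
          rw [← hgl]
          exact heqx.symm
        · rfl
      have heqA : descStep l x = l := by
        simp only [descStep, if_neg hc, PySem.List.len_eq]
        rw [hbs]
        have hmin : min ((l.length : Nat) : Int) ((l.length : Int) - 1)
            = (((l.length - 1 : Nat)) : Int) := by omega
        rw [hmin]
        simp only [PySem.List.pySetD_natCast]
        exact hsetid
      have heqB : decStep l x = l := by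
        simp only [decStep]
        rw [if_neg (by simp [hne, hc]), if_neg hlt]
      exact ⟨heqA.trans heqB.symm, by rw [heqA]; exact ⟨hne, hsort⟩⟩

theorem fold_asc (rest : List Int) :
    ∀ l, AscInv l → rest.foldl ascStep l = rest.foldl incStep l ∧ AscInv (rest.foldl ascStep l) := by
  induction rest with
  | nil => exact fun l h => ⟨rfl, h⟩
  | cons y ys ih =>
    intro l h
    obtain ⟨heq, hinv⟩ := asc_step l y h
    simpa [List.foldl_cons, heq] using ih (incStep l y) (heq ▸ hinv)

theorem fold_desc (rest : List Int) :
    ∀ l, DescInv l → rest.foldl descStep l = rest.foldl decStep l ∧ DescInv (rest.foldl descStep l) := by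
  induction rest with
  | nil => exact fun l h => ⟨rfl, h⟩
  | cons y ys ih =>
    intro l h
    obtain ⟨heq, hinv⟩ := desc_step l y h
    simpa [List.foldl_cons, heq] using ih (decStep l y) (heq ▸ hinv)

-- ===== VERDICT (by name: the statements are the Claim_ definitions above) =====
theorem solution_spec : Claim_equal_solution := by
  intro kyul _ hpre
  unfold Spec_solution
  match kyul with
  | [] => exact absurd rfl hpre
  | k :: rest =>
    have hA : AscInv [k] := ⟨by simp, by simp⟩
    have hD : DescInv [k] := ⟨by simp, by simp⟩
    obtain ⟨ha, _⟩ := fold_asc rest [k] hA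
    obtain ⟨hd, _⟩ := fold_desc rest [k] hD
    have hsplit : (k :: rest).foldl (fun (p : List Int × List Int) x => (incStep p.1 x, decStep p.2 x)) ([], [])
        = (rest.foldl incStep [k], rest.foldl decStep [k]) := by
      have h0 : incStep [] k = [k] := by simp [incStep]
      have h1 : decStep [] k = [k] := by simp [decStep]
      simp only [List.foldl_cons, h0, h1]
      exact PySem.List.foldl_prod_mk incStep decStep rest [k] [k]
    simp only [solution, solution_alt, hsplit, ha, hd, PySem.List.len_eq]
    set a := (rest.foldl incStep [k]).length
    set b := (rest.foldl decStep [k]).length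
    split <;> omega
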